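-- pv_equiv track=rewrite | github.com/kingkaushalagarwal/100daysofcoding | Codechef/OCT20B/POSAND.py | find
-- ===== SOURCE A (Python) =====
-- def check(num):
--     n = num
--     if n==1:
--         return True
--     count =0
--     while n>0:
--         if n&1==1:
--             count+=1
--         n= n>>1
--     if count>1:
--         return True
--     else:
--         return False
--
-- def find(n):
--     #if number is power of 2 than it is not possible to generate any such array
--     if check(n)==False:
--         return [-1]
--     elif n == 5:
--         return [2, 3, 1, 5, 4]
--     elif n==3:
--         return [2, 3, 1]
--     elif n==1:
--         return [1]
--     else:
--         arr =[2,3,1,5,4]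
--         i=6;flag= True
--         while i<=n:
--             if flag:
--                 arr.append(i)
--                 if (i+1)>n:
--                     break
--                 arr.append(i+1)
--                 flag = False
--             else:
--                 if (i+1)>n:
--                     arr.append(i)
--                     break
--                 else:
--                     arr.append(i+1)
--                     arr.append(i)
--                     flag = True
--             i+=2
--         return arr
-- ===== SOURCE B (Python) =====
-- def check(num):
--     n = num
--     if n==1:
--         return True
--     count =0
--     while n>0:
--         if n&1==1:
--             count+=1
--         n= n>>1
--     if count>1:
--         return True
--     else:
--         return False
--
-- def find(n):
--     # same special cases as before; the general tail is a closed-form comprehension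
--     if check(n) == False:
--         return [-1]
--     elif n == 5:
--         return [2, 3, 1, 5, 4]
--     elif n == 3:
--         return [2, 3, 1]
--     elif n == 1:
--         return [1]
--     else:
--         return [2, 3, 1, 5, 4] + [
--             p + 1 if (p - 6) % 4 == 2 and p < n
--             else p - 1 if (p - 6) % 4 == 3
--             else p
--             for p in range(6, n + 1)]
-- ===== Notes on version B (the rewrite author's own statement) =====
-- stated objective: simpler
-- what changed: The stateful flag-driven while loop that interleaves appends is replaced by a stateless closed-form comprehension: each tail position gets its value directly from its offset's residue modulo four past the fixed prefix, with a boundary test keeping the trailing lone element in place; check() and the special cases are kept.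
import Mathlib
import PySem

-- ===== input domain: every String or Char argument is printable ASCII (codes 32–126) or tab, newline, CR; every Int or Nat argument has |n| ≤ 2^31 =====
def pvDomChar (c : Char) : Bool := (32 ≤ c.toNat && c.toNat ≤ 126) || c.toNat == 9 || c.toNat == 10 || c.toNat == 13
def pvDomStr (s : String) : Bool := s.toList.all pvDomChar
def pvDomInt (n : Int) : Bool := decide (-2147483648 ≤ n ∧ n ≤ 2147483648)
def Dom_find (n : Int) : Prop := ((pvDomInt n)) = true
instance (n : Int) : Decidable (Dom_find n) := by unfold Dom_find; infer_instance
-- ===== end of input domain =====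

-- B replaces A's flag-driven interleaving loop by a closed-form per-position comprehension (simpler, stateless); return values are proved identical for every n.

-- ===== PORT A =====
-- while n>0: if n&1==1: count+=1; n >>= 1   (n&1 = n%2 and n>>1 = n//2, exact since only evaluated when n>0 / Python >> 1 is floor division)
-- fuel-based structural recursion; fuel num.toNat is sufficient since n at least halves while n > 0
def checkLoop : Nat → Int → Int → Int
  | 0, _, count => count
  | fuel + 1, n, count =>
    if n > 0 then
      checkLoop fuel (PySem.Int.floordiv n 2) (if PySem.Int.mod n 2 = 1 then count + 1 else count)
    else count

def check (num : Int) : Bool :=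
  if num = 1 then true
  else
    let count := checkLoop num.toNat num 0
    if count > 1 then true else false

-- fuel-based structural recursion; fuel n.toNat + 1 is sufficient since i grows by 2 while i ≤ n
def findLoop : Nat → Int → List Int → Int → Bool → List Int
  | 0, _, arr, _, _ => arr
  | fuel + 1, n, arr, i, flag =>
    if i ≤ n then
      if flag then
        if i + 1 > n then arr ++ [i]
        else findLoop fuel n (arr ++ [i, i + 1]) (i + 2) false
      else
        if i + 1 > n then arr ++ [i]
        else findLoop fuel n (arr ++ [i + 1, i]) (i + 2) true
    else arr

def find (n : Int) : List Int :=
  if check n = false then [-1]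
  else if n = 5 then [2, 3, 1, 5, 4]
  else if n = 3 then [2, 3, 1]
  else if n = 1 then [1]
  else findLoop (n.toNat + 1) n [2, 3, 1, 5, 4] 6 true

-- ===== PORT B =====
def tailVal (n p : Int) : Int :=
  if PySem.Int.mod (p - 6) 4 = 2 ∧ p < n then p + 1
  else if PySem.Int.mod (p - 6) 4 = 3 then p - 1
  else p

def find_alt (n : Int) : List Int :=
  if check n = false then [-1]
  else if n = 5 then [2, 3, 1, 5, 4]
  else if n = 3 then [2, 3, 1]
  else if n = 1 then [1]
  else [2, 3, 1, 5, 4] ++ (PySem.List.pyRange 6 (n + 1) 1).map (tailVal n)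

-- ===== PRECONDITION & SPEC =====
def Spec_find (n : Int) (out : List Int) : Prop := out = find_alt n
instance (n : Int) (out : List Int) : Decidable (Spec_find n out) := by unfold Spec_find; infer_instance

-- ===== CLAIM (what is proved, stated in full; the proofs are below) =====
def Claim_equal_find : Prop := ∀ (n : Int), Dom_find n → Spec_find n (find n)

-- ===== LEMMAS AND PROOFS =====

lemma pm4 (a : Int) : PySem.Int.mod a 4 = a % 4 :=
  PySem.Int.mod_eq_emod_of_pos (by norm_num)

lemma mod4_two (i : Int) (h : PySem.Int.mod (i - 6) 4 = 0) :
    PySem.Int.mod (i + 2 - 6) 4 = 2 := by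
  simp only [pm4] at *
  omega

lemma mod4_zero (i : Int) (h : PySem.Int.mod (i - 6) 4 = 2) :
    PySem.Int.mod (i + 2 - 6) 4 = 0 := by
  simp only [pm4] at *
  omega

lemma tailVal_mod0 (n i : Int) (h : PySem.Int.mod (i - 6) 4 = 0) : tailVal n i = i := by
  unfold tailVal
  simp only [pm4] at *
  split_ifs with h1 h2 <;> omega

lemma tailVal_mod1 (n i : Int) (h : PySem.Int.mod (i - 6) 4 = 0) : tailVal n (i + 1) = i + 1 := by
  unfold tailVal
  simp only [pm4] at *
  split_ifs with h1 h2 <;> omega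

lemma tailVal_mod2_last (n i : Int) (h : PySem.Int.mod (i - 6) 4 = 2) (hn : ¬ i < n) :
    tailVal n i = i := by
  unfold tailVal
  simp only [pm4] at *
  split_ifs with h1 h2 <;> omega

lemma tailVal_mod2 (n i : Int) (h : PySem.Int.mod (i - 6) 4 = 2) (hn : i < n) :
    tailVal n i = i + 1 := by
  unfold tailVal
  simp only [pm4] at *
  split_ifs with h1 h2 <;> omega

lemma tailVal_mod3 (n i : Int) (h : PySem.Int.mod (i - 6) 4 = 2) : tailVal n (i + 1) = i := by
  unfold tailVal
  simp only [pm4] at *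
  split_ifs with h1 h2 <;> omega

-- A's loop, run from any position with the matching flag, appends exactly the map of tailVal
lemma findLoop_eq (n : Int) (k : Nat) :
    ∀ (i : Int) (flag : Bool) (arr : List Int),
      (n + 1 - i).toNat ≤ 2 * k →
      ((PySem.Int.mod (i - 6) 4 = 0 ∧ flag = true) ∨
       (PySem.Int.mod (i - 6) 4 = 2 ∧ flag = false)) →
      findLoop k n arr i flag = arr ++ (PySem.List.pyRange i (n + 1) 1).map (tailVal n) := by
  induction k with
  | zero =>
      intro i flag arr hk _
      rw [findLoop, PySem.List.pyRange_one_eq_nil (by omega)]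
      simp
  | succ k ih =>
      intro i flag arr hk hf
      by_cases hin : i ≤ n
      · have hcons : PySem.List.pyRange i (n + 1) 1 = i :: PySem.List.pyRange (i + 1) (n + 1) 1 :=
          PySem.List.pyRange_one_cons (by omega)
        rcases hf with ⟨hm, hfl⟩ | ⟨hm, hfl⟩
        · subst hfl
          by_cases hlast : i + 1 > n
          · -- lone trailing element, flag = true
            have hnil : PySem.List.pyRange (i + 1) (n + 1) 1 = [] :=
              PySem.List.pyRange_one_eq_nil (by omega)
            rw [findLoop, if_pos hin]
            simp [hlast, hcons, hnil, tailVal_mod0 n i hm]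
          · have hcons2 : PySem.List.pyRange (i + 1) (n + 1) 1
                = (i + 1) :: PySem.List.pyRange (i + 1 + 1) (n + 1) 1 :=
              PySem.List.pyRange_one_cons (by omega)
            rw [findLoop, if_pos hin]
            simp only [if_neg hlast]
            rw [ih (i + 2) false (arr ++ [i, i + 1]) (by omega)
                (Or.inr ⟨mod4_two i hm, rfl⟩)]
            have : i + 1 + 1 = i + 2 := by ring
            rw [hcons, hcons2, this]
            simp [tailVal_mod0 n i hm, tailVal_mod1 n i hm]
        · subst hfl
          by_cases hlast : i + 1 > n
          · have hnil : PySem.List.pyRange (i + 1) (n + 1) 1 = [] :=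
              PySem.List.pyRange_one_eq_nil (by omega)
            rw [findLoop, if_pos hin]
            simp [hlast, hcons, hnil, tailVal_mod2_last n i hm (by omega)]
          · have hcons2 : PySem.List.pyRange (i + 1) (n + 1) 1
                = (i + 1) :: PySem.List.pyRange (i + 1 + 1) (n + 1) 1 :=
              PySem.List.pyRange_one_cons (by omega)
            rw [findLoop, if_pos hin]
            simp only [Bool.false_eq_true, if_neg hlast]
            rw [ih (i + 2) true (arr ++ [i + 1, i]) (by omega)
                (Or.inl ⟨mod4_zero i hm, rfl⟩)]
            have : i + 1 + 1 = i + 2 := by ring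
            rw [hcons, hcons2, this]
            simp [tailVal_mod2 n i hm (by omega), tailVal_mod3 n i hm]
      · rw [findLoop, if_neg hin, PySem.List.pyRange_one_eq_nil (by omega)]
        simp

lemma findLoop_main (n : Int) :
    findLoop (n.toNat + 1) n [2, 3, 1, 5, 4] 6 true
      = [2, 3, 1, 5, 4] ++ (PySem.List.pyRange 6 (n + 1) 1).map (tailVal n) := by
  exact findLoop_eq n (n.toNat + 1) 6 true [2, 3, 1, 5, 4] (by omega)
    (Or.inl ⟨by simp [PySem.Int.mod], rfl⟩)

-- ===== VERDICT (by name: the statement is the Claim_ definition above) =====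
theorem find_spec : Claim_equal_find := by
  intro n _
  unfold Spec_find find find_alt
  split_ifs <;> first | rfl | exact findLoop_main n
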